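-- pv_equiv track=rewrite | github.com/nevermined-io/payments-py | scripts/convert_to_mintlify.py | dedent_content
-- ===== SOURCE A (Python) =====
-- def dedent_content(content: str) -> str:
--     """Remove 4-space indentation from admonition content."""
--     lines = content.split("\n")
--     dedented = []
--     for line in lines:
--         if line.startswith("    "):
--             dedented.append(line[4:])
--         else:
--             dedented.append(line)
--     return "\n".join(dedented)
-- ===== SOURCE B (Python) =====
-- def dedent_content(content: str) -> str:
--     """Remove 4-space indentation from admonition content."""
--     out = []
--     at_line_start = True
--     i = 0
--     n = len(content)
--     while i < n:
--         if at_line_start and content.startswith("    ", i):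
--             i += 4
--             at_line_start = False
--         else:
--             c = content[i]
--             out.append(c)
--             at_line_start = c == "\n"
--             i += 1
--     return "".join(out)
-- ===== Notes on version B (the rewrite author's own statement) =====
-- stated objective: alternative
-- what changed: A splits the string into lines, tests/strips a 4-space prefix per line and joins them back; B makes a single character-level pass with an at-line-start flag, skipping a four-space prefix right after each newline, with no line list built.
import Mathlib
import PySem

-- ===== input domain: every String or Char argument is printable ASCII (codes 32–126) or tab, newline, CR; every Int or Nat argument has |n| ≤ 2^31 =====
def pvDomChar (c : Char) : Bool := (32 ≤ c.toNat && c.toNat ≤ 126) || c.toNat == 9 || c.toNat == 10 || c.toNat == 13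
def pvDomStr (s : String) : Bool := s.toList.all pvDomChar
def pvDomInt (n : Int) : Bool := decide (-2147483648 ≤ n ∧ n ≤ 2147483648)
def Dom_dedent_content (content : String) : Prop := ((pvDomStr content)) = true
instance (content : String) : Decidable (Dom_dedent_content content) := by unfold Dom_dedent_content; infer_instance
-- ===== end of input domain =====

-- B replaces A's split-into-lines / per-line test / join pipeline by a single left-to-right
-- character scan carrying an at-line-start flag (objective: alternative, same linear cost).

-- ===== PORT A =====
-- A: split on "\n", strip a "    " prefix from each line, join with "\n".
def dedent_content (content : String) : String :=
  let lines := PySem.Chars.splitOn content.toList ['\n']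
  let dedented := lines.foldl (fun acc line =>
    if PySem.Chars.startswith line [' ', ' ', ' ', ' ']
    then acc ++ [PySem.Chars.slice line (some 4) none]
    else acc ++ [line]) []
  String.ofList (PySem.Chars.join ['\n'] dedented)

-- ===== PORT B =====
-- B: one pass over the characters with an at-line-start flag; at a line start,
-- a "    " prefix is skipped; otherwise the character is copied.
def dedentGo : Bool → List Char → List Char
  | _, [] => []
  | atStart, c :: rest =>
    if atStart && [' ', ' ', ' ', ' '].isPrefixOf (c :: rest)
    then dedentGo false (rest.drop 3)
    else c :: dedentGo (c == '\n') rest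
termination_by _ l => l.length
decreasing_by
  · simp [List.length_drop]
  · simp

def dedent_content_alt (content : String) : String :=
  String.ofList (dedentGo true content.toList)

-- ===== PRECONDITION & SPEC =====
def Spec_dedent_content (content : String) (out : String) : Prop := out = dedent_content_alt content
instance (content : String) (out : String) : Decidable (Spec_dedent_content content out) := by unfold Spec_dedent_content; infer_instance

-- ===== CLAIM (what is proved, stated in full; the proofs are below) =====
def Claim_equal_dedent_content : Prop := ∀ (content : String), Dom_dedent_content content → Spec_dedent_content content (dedent_content content)

-- ===== LEMMAS AND PROOFS =====

-- structural line splitter: first line (up to the first '\n') and the remaining lines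
def mySplit : List Char → List Char × List (List Char)
  | [] => ([], [])
  | c :: rest =>
    let p := mySplit rest
    if c = '\n' then ([], p.1 :: p.2) else (c :: p.1, p.2)

def dedLine (line : List Char) : List Char :=
  if [' ', ' ', ' ', ' '].isPrefixOf line then line.drop 4 else line

lemma slice4 (l : List Char) : PySem.List.slice l (some 4) none = l.drop 4 := by
  have h := PySem.List.slice_from_natCast (xs := l) (a := 4)
  simpa using h

lemma mySplit_fst_prefix (l : List Char) : (mySplit l).1 <+: l := by
  induction l with
  | nil => simp [mySplit]
  | cons c rest ih =>
    by_cases hc : c = '\n' <;> simp [mySplit, hc]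
    exact ih

lemma splitOn_go_eq (fuel : Nat) : ∀ (l cur : List Char) (acc : List (List Char)),
    l.length < fuel →
    PySem.Chars.splitOn.go ['\n'] fuel l cur acc =
      acc.reverse ++ ((cur.reverse ++ (mySplit l).1) :: (mySplit l).2) := by
  induction fuel with
  | zero => intro l cur acc h; omega
  | succ n ih =>
    intro l cur acc h
    cases l with
    | nil => simp [PySem.Chars.splitOn.go, mySplit]
    | cons c rest =>
      by_cases hc : c = '\n'
      · subst hc
        have hp : ['\n'].isPrefixOf ('\n' :: rest) = true := by simp [List.isPrefixOf]
        simp only [PySem.Chars.splitOn.go, hp, if_pos]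
        rw [show List.drop (['\n'].length) ('\n' :: rest) = rest from rfl]
        rw [ih rest [] (cur.reverse :: acc) (by simp at h ⊢; omega)]
        simp [mySplit]
      · have hp : ['\n'].isPrefixOf (c :: rest) = false := by
          simp [List.isPrefixOf]
          exact fun h' => absurd h'.symm hc
        simp only [PySem.Chars.splitOn.go, hp, Bool.false_eq_true, if_false]
        rw [ih rest (c :: cur) acc (by simp at h ⊢; omega)]
        simp [mySplit, hc]

lemma splitOn_eq_mySplit (l : List Char) :
    PySem.Chars.splitOn l ['\n'] = (mySplit l).1 :: (mySplit l).2 := by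
  unfold PySem.Chars.splitOn
  rw [splitOn_go_eq (l.length + 1) l [] [] (by omega)]
  simp

lemma foldl_append_map {α β : Type} (f : α → β) (l : List α) (a : List β) :
    l.foldl (fun acc x => acc ++ [f x]) a = a ++ l.map f := by
  induction l generalizing a with
  | nil => simp
  | cons x xs ih => simp [List.foldl, ih]

lemma join_newline (x : List Char) (xs : List (List Char)) :
    PySem.Chars.join ['\n'] (x :: xs) = x ++ xs.flatMap (fun ln => '\n' :: ln) := by
  induction xs generalizing x with
  | nil => simp [PySem.Chars.join, List.intercalate]
  | cons y ys ih =>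
    have := ih y
    simp [PySem.Chars.join, List.intercalate, List.intersperse] at this ⊢
    simp [this]

-- the two mutually characterizing facts about dedentGo, by induction on the length
lemma dedentGo_char : ∀ (n : Nat) (l : List Char), l.length ≤ n →
    (dedentGo true l = dedLine (mySplit l).1 ++ (mySplit l).2.flatMap (fun ln => '\n' :: dedLine ln)) ∧
    (dedentGo false l = (mySplit l).1 ++ (mySplit l).2.flatMap (fun ln => '\n' :: dedLine ln)) := by
  intro n
  induction n with
  | zero =>
    intro l hl
    have : l = [] := List.length_eq_zero_iff.mp (Nat.le_zero.mp hl)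
    subst this
    simp [dedentGo, mySplit, dedLine]
  | succ n ih =>
    intro l hl
    cases l with
    | nil => simp [dedentGo, mySplit, dedLine]
    | cons c rest =>
      have hlen : rest.length ≤ n := by simp at hl; omega
      constructor
      · by_cases hp : [' ', ' ', ' ', ' '].isPrefixOf (c :: rest) = true
        · -- line starts with four spaces: A drops them, B skips them
          obtain ⟨tail, htail⟩ := List.isPrefixOf_iff_prefix.mp hp
          have hc : ' ' = c := by injection htail
          have hrest : rest = ' ' :: ' ' :: ' ' :: tail := by
            have h2 := htail; injection h2 with _ h2; exact h2.symm
          subst hc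
          rw [show dedentGo true (' ' :: rest) = dedentGo false (rest.drop 3) by
            rw [dedentGo]; simp [hp]]
          subst hrest
          have hq := (ih tail (by simp at hlen ⊢; omega)).2
          simp only [List.drop_succ_cons, List.drop_zero]
          rw [hq]
          have hsp : mySplit (' ' :: ' ' :: ' ' :: ' ' :: tail) =
              (' ' :: ' ' :: ' ' :: ' ' :: (mySplit tail).1, (mySplit tail).2) := by
            simp [mySplit]
          rw [hsp]
          simp [dedLine, List.isPrefixOf_iff_prefix]
        · -- no four-space prefix: the first character is copied
          rw [show dedentGo true (c :: rest) = c :: dedentGo (c == '\n') rest by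
            rw [dedentGo]; simp [hp]]
          by_cases hc : c = '\n'
          · subst hc
            have hP := (ih rest hlen).1
            simp only [beq_self_eq_true]
            rw [hP]
            simp [mySplit, dedLine, List.isPrefixOf_iff_prefix]
          · have hQ := (ih rest hlen).2
            have hb : (c == '\n') = false := by simp [hc]
            rw [hb, hQ]
            have hsp : mySplit (c :: rest) = (c :: (mySplit rest).1, (mySplit rest).2) := by
              simp [mySplit, hc]
            rw [hsp]
            have hded : dedLine (c :: (mySplit rest).1) = c :: (mySplit rest).1 := by
              unfold dedLine
              rw [if_neg]
              intro hpre
              apply hp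
              rw [List.isPrefixOf_iff_prefix] at hpre ⊢
              exact hpre.trans (List.cons_prefix_cons.mpr ⟨rfl, mySplit_fst_prefix rest⟩)
            rw [hded]
            simp
      · -- inside a line (flag false): every character is copied as is
        rw [show dedentGo false (c :: rest) = c :: dedentGo (c == '\n') rest by
          rw [dedentGo]; simp]
        by_cases hc : c = '\n'
        · subst hc
          have hP := (ih rest hlen).1
          simp only [beq_self_eq_true]
          rw [hP]
          simp [mySplit]
        · have hQ := (ih rest hlen).2
          have hb : (c == '\n') = false := by simp [hc]
          rw [hb, hQ]
          simp [mySplit, hc]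

-- ===== VERDICT (by name: the statement is the Claim_ definition above) =====
theorem dedent_content_spec : Claim_equal_dedent_content := by
  intro content _
  unfold Spec_dedent_content dedent_content dedent_content_alt
  simp only [splitOn_eq_mySplit]
  have hfun : (fun (acc : List (List Char)) line =>
      if PySem.Chars.startswith line [' ', ' ', ' ', ' ']
      then acc ++ [PySem.Chars.slice line (some 4) none]
      else acc ++ [line]) = (fun acc line => acc ++ [dedLine line]) := by
    funext acc line
    unfold dedLine
    by_cases hs : [' ', ' ', ' ', ' '].isPrefixOf line = true <;>
      simp [PySem.Chars.startswith, hs, PySem.Chars.slice_eq_listSlice, slice4]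
  rw [hfun, foldl_append_map, List.nil_append, List.map_cons, join_newline]
  have hchar := (dedentGo_char content.toList.length content.toList le_rfl).1
  rw [hchar]
  congr 1
  rw [List.flatMap_map]
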